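-- pv_equiv track=rewrite | github.com/JonghyunJoo/BJStudy | 프로그래머스/1/42840. 모의고사/모의고사.py | solution
-- ===== SOURCE A (Python) =====
-- def solution(answers):
--     pattern = [
--         [1,2,3,4,5],
--         [2,1,2,3,2,4,2,5],
--         [3,3,1,1,2,2,4,4,5,5]
--     ]
--     collect = [0, 0, 0]
--     for i, answer in enumerate(answers):
--         for j in range(3):
--             if answer == pattern[j][i%len(pattern[j])]:
--                 collect[j] +=1
--
--     high_scored = max(collect)
--     result = []
--     for i, score in enumerate(collect):
--         if score == high_scored:
--             result.append(i+1)
--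
--     return result
-- ===== SOURCE B (Python) =====
-- def solution(answers):
--     patterns = ([1, 2, 3, 4, 5],
--                 [2, 1, 2, 3, 2, 4, 2, 5],
--                 [3, 3, 1, 1, 2, 2, 4, 4, 5, 5])
--
--     def score(pat):
--         s, rest = 0, []
--         for a in answers:
--             if not rest:
--                 rest = list(pat)
--             p = rest.pop(0)
--             if a == p:
--                 s += 1
--         return s
--
--     scores = [score(p) for p in patterns]
--     best = max(scores)
--     return [i + 1 for i, s in enumerate(scores) if s == best]
-- ===== Notes on version B (the rewrite author's own statement) =====
-- stated objective: simpler
-- what changed: B scores each fixed pattern in its own independent pass, cycling through the pattern by consuming and refilling a rotation list (no per-element i % len index arithmetic), instead of A's single interleaved pass updating all three counters; the result list is built by a comprehension over the scores.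
import Mathlib
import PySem

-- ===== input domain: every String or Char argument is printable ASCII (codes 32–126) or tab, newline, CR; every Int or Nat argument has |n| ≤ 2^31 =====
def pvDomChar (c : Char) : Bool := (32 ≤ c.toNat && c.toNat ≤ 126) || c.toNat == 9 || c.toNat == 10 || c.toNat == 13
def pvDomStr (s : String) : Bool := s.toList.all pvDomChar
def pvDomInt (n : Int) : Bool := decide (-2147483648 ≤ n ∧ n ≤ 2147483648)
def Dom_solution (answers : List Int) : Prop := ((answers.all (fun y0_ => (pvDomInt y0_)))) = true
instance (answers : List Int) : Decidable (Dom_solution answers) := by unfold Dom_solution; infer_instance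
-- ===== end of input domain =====

-- B scores each fixed pattern in its own independent pass, cycling by consuming and refilling a
-- rotation list, instead of A's single interleaved pass over the answers with i % len indexing.

-- ===== PORT A =====
-- A's local 'pattern' list of the three fixed answer patterns
def patsA : List (List Int) := [[1,2,3,4,5],[2,1,2,3,2,4,2,5],[3,3,1,1,2,2,4,4,5,5]]

def solution (answers : List Int) : List Int :=
  let collect := (PySem.List.enumerate answers).foldl
    (fun (c : List Int) (p : Int × Int) =>
      (PySem.List.pyRange 0 3 1).foldl
        (fun (c : List Int) (j : Int) =>
          let pj := PySem.List.pyGetD patsA j []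
          if p.2 = PySem.List.pyGetD pj (PySem.Int.mod p.1 (pj.length : Int)) 0
          then c.set j.toNat (PySem.List.pyGetD c j 0 + 1) else c)
        c)
    [0, 0, 0]
  -- max(collect): collect always has 3 elements, so max? is some and the getD default is never taken
  let high := (PySem.List.max? collect (fun x => x)).getD 0
  (PySem.List.enumerate collect).foldl
    (fun (r : List Int) (p : Int × Int) => if p.2 = high then r ++ [p.1 + 1] else r) []

-- ===== PORT B =====
-- score one pattern: walk the answers, consuming 'rest' and refilling it from 'pat' when empty
def scoreGo (pat : List Int) : List Int → List Int → Int
  | [], _ => 0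
  | a :: as, rest =>
    match (if rest.isEmpty then pat else rest) with
    | [] => 0  -- unreachable: every pattern passed in is nonempty
    | p :: rs => (if a = p then 1 else 0) + scoreGo pat as rs

def solution_alt (answers : List Int) : List Int :=
  let patterns : List (List Int) := [[1,2,3,4,5],[2,1,2,3,2,4,2,5],[3,3,1,1,2,2,4,4,5,5]]
  let scores := patterns.map (fun pat => scoreGo pat answers [])
  let best := (PySem.List.max? scores (fun x => x)).getD 0
  (PySem.List.enumerate scores).filterMap
    (fun (p : Int × Int) => if p.2 = best then some (p.1 + 1) else none)

-- ===== PRECONDITION & SPEC =====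
def Spec_solution (answers : List Int) (out : List Int) : Prop := out = solution_alt answers
instance (answers : List Int) (out : List Int) : Decidable (Spec_solution answers out) := by unfold Spec_solution; infer_instance

-- ===== CLAIM (what is proved, stated in full; the proofs are below) =====
def Claim_equal_solution : Prop := ∀ (answers : List Int), Dom_solution answers → Spec_solution answers (solution answers)

-- ===== LEMMAS AND PROOFS =====

-- common reference count: matches of 'pat' cycled from offset n against 'as'
def cnt (pat : List Int) : Nat → List Int → Int
  | _, [] => 0
  | n, a :: as => (if a = pat.getD (n % pat.length) 0 then 1 else 0) + cnt pat (n + 1) as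

lemma succ_mod (n len : Nat) (h : 0 < len) :
    (n + 1) % len = if n % len + 1 = len then 0 else n % len + 1 := by
  rcases Nat.lt_or_ge 1 len with h1 | h1
  · rw [Nat.add_mod, Nat.mod_eq_of_lt h1]
    by_cases hc : n % len + 1 = len
    · rw [hc, Nat.mod_self]; simp
    · have hlt : n % len + 1 < len :=
        lt_of_le_of_ne (Nat.succ_le_of_lt (Nat.mod_lt _ h)) hc
      rw [Nat.mod_eq_of_lt hlt, if_neg hc]
  · have : len = 1 := by omega
    subst this
    simp [Nat.mod_one]

lemma scoreGo_nil_rest (pat : List Int) (as : List Int) :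
    scoreGo pat as [] = scoreGo pat as pat := by
  cases as <;> simp [scoreGo]

lemma scoreGo_eq_cnt (pat : List Int) (h : pat ≠ []) (as : List Int) :
    ∀ n : Nat, scoreGo pat as (pat.drop (n % pat.length)) = cnt pat n as := by
  induction as with
  | nil => intro n; simp [scoreGo, cnt]
  | cons a as ih =>
    intro n
    have hlen : 0 < pat.length := List.length_pos_of_ne_nil h
    have hm : n % pat.length < pat.length := Nat.mod_lt _ hlen
    have hdrop : pat.drop (n % pat.length) = pat[n % pat.length] :: pat.drop (n % pat.length + 1) :=
      List.drop_eq_getElem_cons hm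
    have hrec : scoreGo pat as (pat.drop (n % pat.length + 1)) = cnt pat (n + 1) as := by
      by_cases hc : n % pat.length + 1 = pat.length
      · have hnil : pat.drop (n % pat.length + 1) = [] := by rw [hc]; simp
        rw [hnil, scoreGo_nil_rest]
        have h0 : (n + 1) % pat.length = 0 := by rw [succ_mod n _ hlen, if_pos hc]
        have := ih (n + 1)
        rwa [h0, List.drop_zero] at this
      · have h1 : (n + 1) % pat.length = n % pat.length + 1 := by
          rw [succ_mod n _ hlen, if_neg hc]
        have := ih (n + 1)
        rwa [h1] at this
    have hget : pat[n % pat.length] = pat.getD (n % pat.length) 0 :=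
      (List.getD_eq_getElem pat 0 hm).symm
    rw [hdrop]
    simp only [scoreGo, cnt, List.isEmpty_cons, Bool.false_eq_true, reduceIte]
    rw [hrec, hget]

lemma scoreGo_start (pat : List Int) (h : pat ≠ []) (as : List Int) :
    scoreGo pat as [] = cnt pat 0 as := by
  rw [scoreGo_nil_rest]
  have := scoreGo_eq_cnt pat h as 0
  rwa [Nat.zero_mod, List.drop_zero] at this

-- one step of A's interleaved pass on a concrete 3-element score state
lemma stepA_eval (x y z : Int) (n : Nat) (a : Int) :
    (PySem.List.pyRange 0 3 1).foldl
        (fun (c : List Int) (j : Int) =>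
          let pj := PySem.List.pyGetD patsA j []
          if a = PySem.List.pyGetD pj (PySem.Int.mod (n : Int) (pj.length : Int)) 0
          then c.set j.toNat (PySem.List.pyGetD c j 0 + 1) else c)
        [x, y, z]
      = [x + (if a = ([1,2,3,4,5] : List Int).getD (n % 5) 0 then 1 else 0),
         y + (if a = ([2,1,2,3,2,4,2,5] : List Int).getD (n % 8) 0 then 1 else 0),
         z + (if a = ([3,3,1,1,2,2,4,4,5,5] : List Int).getD (n % 10) 0 then 1 else 0)] := by
  rw [show PySem.List.pyRange 0 3 1 = [0,1,2] from by decide]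
  simp only [List.foldl_cons, List.foldl_nil]
  rw [show PySem.List.pyGetD patsA 0 [] = [1,2,3,4,5] from rfl,
      show PySem.List.pyGetD patsA 1 [] = [2,1,2,3,2,4,2,5] from rfl,
      show PySem.List.pyGetD patsA 2 [] = [3,3,1,1,2,2,4,4,5,5] from rfl]
  simp only [List.length_cons, List.length_nil, Nat.reduceAdd, PySem.Int.mod_natCast,
    PySem.List.pyGetD_natCast]
  split_ifs <;>
    simp [List.set, PySem.List.pyGetD, PySem.List.pyGet?, PySem.List.pyIdx?]

-- A's whole first pass computes the three cycle-counts
lemma foldA_eq (as : List Int) :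
    ∀ (n : Nat) (x y z : Int),
      (PySem.List.enumerate as (n : Int)).foldl
        (fun (c : List Int) (p : Int × Int) =>
          (PySem.List.pyRange 0 3 1).foldl
            (fun (c : List Int) (j : Int) =>
              let pj := PySem.List.pyGetD patsA j []
              if p.2 = PySem.List.pyGetD pj (PySem.Int.mod p.1 (pj.length : Int)) 0
              then c.set j.toNat (PySem.List.pyGetD c j 0 + 1) else c)
            c)
        [x, y, z]
      = [x + cnt [1,2,3,4,5] n as, y + cnt [2,1,2,3,2,4,2,5] n as,
         z + cnt [3,3,1,1,2,2,4,4,5,5] n as] := by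
  induction as with
  | nil => intro n x y z; simp [cnt]
  | cons a as ih =>
    intro n x y z
    rw [PySem.List.enumerate_cons, List.foldl_cons, stepA_eval]
    have hcast : ((n : Int) + 1) = ((n + 1 : Nat) : Int) := by push_cast; ring
    rw [hcast, ih]
    simp only [cnt, List.length_cons, List.length_nil, Nat.reduceAdd, List.cons.injEq, and_true]
    refine ⟨?_, ?_, ?_⟩ <;> ring_nf

-- the output stage: A's foldl-append and B's filterMap agree on a 3-element score list
lemma out_eq (s1 s2 s3 h : Int) :
    (PySem.List.enumerate [s1, s2, s3]).foldl
        (fun (r : List Int) (p : Int × Int) => if p.2 = h then r ++ [p.1 + 1] else r) []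
      = (PySem.List.enumerate [s1, s2, s3]).filterMap
        (fun (p : Int × Int) => if p.2 = h then some (p.1 + 1) else none) := by
  simp only [PySem.List.enumerate_cons, PySem.List.enumerate_nil, List.foldl_cons,
    List.foldl_nil, List.filterMap]
  split_ifs <;> simp

-- ===== VERDICT (by name: the statement is the Claim_ definition above) =====
theorem solution_spec : Claim_equal_solution := by
  unfold Claim_equal_solution
  intro answers _
  unfold Spec_solution solution solution_alt
  have hA := foldA_eq answers 0 0 0 0
  rw [show ((0 : Nat) : Int) = 0 from rfl] at hA
  simp only [zero_add] at hA
  rw [hA]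
  simp only [List.map]
  simp only [scoreGo_start [1,2,3,4,5] (by simp) answers,
      scoreGo_start [2,1,2,3,2,4,2,5] (by simp) answers,
      scoreGo_start [3,3,1,1,2,2,4,4,5,5] (by simp) answers]
  exact out_eq _ _ _ _
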